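-- pv_equiv track=rewrite | github.com/duartelaia/projeto-ia | main.py | rotation_posibilities
-- ===== SOURCE A (Python) =====
-- OFF = 0
--
-- ON = 1
--
-- def rotation_posibilities(top, bot, right, left):
--     bits = (top, bot, right, left)
--     possibilities = [[ON, OFF, OFF, OFF], [OFF, ON, OFF, OFF],
--                      [OFF, OFF, ON, OFF], [OFF, OFF, OFF, ON]]
--
--     for i in range(4):
--         if (bits[i] == ON):
--             # In this case, there is only one possibility,
--             # so create that possibility and return it
--             possibilities = [[OFF for i in range(4)]]
--             possibilities[0][i] = ON
--             break
--
--         elif (bits[i] == OFF):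
--             # In this case, we know that a specific possiblity
--             # is impossible, so create that possibility and
--             # remove it from the list
--             comb = [OFF for i in range(4)]
--             comb[i] = ON
--             possibilities.remove(comb)
--
--     return possibilities
-- ===== SOURCE B (Python) =====
-- OFF = 0
--
-- ON = 1
--
-- def rotation_posibilities(top, bot, right, left):
--     bits = (top, bot, right, left)
--     # First ON bit (scanned 0..3) forces the unique possibility.
--     for i in range(4):
--         if bits[i] == ON:
--             return [[ON if j == i else OFF for j in range(4)]]
--     # No ON bit: keep exactly the rows whose position is not OFF.
--     return [[ON if j == i else OFF for j in range(4)]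
--             for i in range(4) if bits[i] != OFF]
-- ===== Notes on version B (the rewrite author's own statement) =====
-- stated objective: simpler
-- what changed: B builds only the allowed rows additively (return the one-hot row of the first ON bit, else a comprehension of one-hot rows for non-OFF positions) instead of A's seeding the full list and removing forbidden rows with list.remove.
import Mathlib
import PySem

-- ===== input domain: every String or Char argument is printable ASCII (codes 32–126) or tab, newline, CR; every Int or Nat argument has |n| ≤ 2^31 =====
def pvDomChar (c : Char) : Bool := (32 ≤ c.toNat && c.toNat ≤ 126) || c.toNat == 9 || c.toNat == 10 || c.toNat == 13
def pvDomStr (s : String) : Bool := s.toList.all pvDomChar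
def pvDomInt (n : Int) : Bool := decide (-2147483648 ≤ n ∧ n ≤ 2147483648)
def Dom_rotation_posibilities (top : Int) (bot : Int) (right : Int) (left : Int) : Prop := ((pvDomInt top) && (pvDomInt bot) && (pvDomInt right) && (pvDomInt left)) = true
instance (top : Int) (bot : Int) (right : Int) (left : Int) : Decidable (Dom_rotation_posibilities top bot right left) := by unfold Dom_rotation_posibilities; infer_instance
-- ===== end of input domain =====

-- B replaces A's seed-full-list-then-remove strategy by additively building only
-- the allowed rows (objective: simpler); behaviour is identical on all inputs.

-- ===== PORT A =====
-- comb = [OFF for _ in range(4)]; comb[i] = ON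
def pvRowA (i : Nat) : List Int := (List.replicate 4 (0 : Int)).set i 1

-- the 'for i in range(4)' loop of A, with 'break' as returning [row] directly.
-- bits has length 4 and i < 4, so .getD i 0 is exactly Python's bits[i];
-- possibilities.remove(comb) never raises (comb is always present), so the
-- .getD poss branch of remove? is unreachable.
def pvLoopA (bits : List Int) (i : Nat) (poss : List (List Int)) : List (List Int) :=
  if i < 4 then
    if bits.getD i 0 == 1 then
      [pvRowA i]
    else if bits.getD i 0 == 0 then
      pvLoopA bits (i + 1) ((PySem.List.remove? poss (pvRowA i)).getD poss)
    else
      pvLoopA bits (i + 1) poss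
  else poss
termination_by 4 - i

def rotation_posibilities (top : Int) (bot : Int) (right : Int) (left : Int) : List (List Int) :=
  pvLoopA [top, bot, right, left] 0
    [[1, 0, 0, 0], [0, 1, 0, 0], [0, 0, 1, 0], [0, 0, 0, 1]]

-- ===== PORT B =====
-- [ON if j == i else OFF for j in range(4)]
def pvOneHot (i : Nat) : List Int := (List.range 4).map (fun j => if j = i then 1 else 0)

def rotation_posibilities_alt (top : Int) (bot : Int) (right : Int) (left : Int) : List (List Int) :=
  let bits : List Int := [top, bot, right, left]
  match bits.findIdx? (fun b => decide (b = 1)) with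
  | some i => [pvOneHot i]
  | none => ((List.range 4).filter (fun i => decide (bits.getD i 0 ≠ 0))).map pvOneHot

-- ===== PRECONDITION & SPEC =====
def Spec_rotation_posibilities (top : Int) (bot : Int) (right : Int) (left : Int) (out : List (List Int)) : Prop := out = rotation_posibilities_alt top bot right left
instance (top : Int) (bot : Int) (right : Int) (left : Int) (out : List (List Int)) : Decidable (Spec_rotation_posibilities top bot right left out) := by unfold Spec_rotation_posibilities; infer_instance

-- ===== CLAIM (what is proved, stated in full; the proofs are below) =====
def Claim_equal_rotation_posibilities : Prop := ∀ (top : Int) (bot : Int) (right : Int) (left : Int), Dom_rotation_posibilities top bot right left → Spec_rotation_posibilities top bot right left (rotation_posibilities top bot right left)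

-- ===== LEMMAS AND PROOFS =====

-- ===== VERDICT (by name: the statement is the Claim_ definition above) =====
set_option maxHeartbeats 4000000 in
theorem rotation_posibilities_spec : Claim_equal_rotation_posibilities := by
  intro top bot right left _
  unfold Spec_rotation_posibilities rotation_posibilities rotation_posibilities_alt
  by_cases h1 : top = 1 <;> by_cases h2 : bot = 1 <;> by_cases h3 : right = 1 <;> by_cases h4 : left = 1 <;>
    by_cases g1 : top = 0 <;> by_cases g2 : bot = 0 <;> by_cases g3 : right = 0 <;> by_cases g4 : left = 0 <;>
    simp_all [pvLoopA, pvRowA, pvOneHot, PySem.List.remove?, List.findIdx?, List.findIdx?.go,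
      List.idxOf?, List.eraseIdx, List.range, List.range.loop, List.filter, List.map,
      beq_iff_eq, ne_eq]
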